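-- pv_equiv track=rewrite | github.com/UW-Madison-Lee-Lab/ENTP | rasp/count_triplets.py | count_triplets_linear
-- ===== SOURCE A (Python) =====
-- def count_triplets_linear(x):
--     n = len(x)
--     count = 0
--     mod_counts = [0] * n
--     for i in range(n):
--         mod_counts[-x[i] % n] += 1
--
--     for i in range(n):
--         count += mod_counts[(x[i] + x[-1]) % n]
--
--     return count % n
-- ===== SOURCE B (Python) =====
-- def count_triplets_linear(x):
--     n = len(x)
--     count = 0
--     for i in range(n):
--         for j in range(n):
--             if (x[i] + x[j] + x[-1]) % n == 0:
--                 count += 1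
--     return count % n
-- ===== Notes on version B (the rewrite author's own statement) =====
-- stated objective: simpler
-- what changed: Replaces the two-pass modular bucket array with a direct double loop that counts pairs (i,j) with (x[i]+x[j]+x[-1]) % n == 0.
import Mathlib
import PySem

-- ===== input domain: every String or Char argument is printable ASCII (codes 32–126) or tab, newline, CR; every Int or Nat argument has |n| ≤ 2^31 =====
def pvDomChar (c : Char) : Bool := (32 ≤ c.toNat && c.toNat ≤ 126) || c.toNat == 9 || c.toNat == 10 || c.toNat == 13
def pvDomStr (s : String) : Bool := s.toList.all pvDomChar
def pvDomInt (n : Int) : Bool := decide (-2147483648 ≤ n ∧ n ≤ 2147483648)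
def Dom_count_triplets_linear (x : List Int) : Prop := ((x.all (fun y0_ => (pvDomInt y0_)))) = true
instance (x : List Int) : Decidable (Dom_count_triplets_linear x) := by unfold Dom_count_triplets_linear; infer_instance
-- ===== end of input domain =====

-- B replaces A's two-pass modular bucket counting with a direct double loop over all
-- index pairs (simpler, same return value; not faster).

-- ===== PORT A =====
def count_triplets_linear (x : List Int) : Int :=
  let n : Int := x.length
  let count : Int := 0
  let mod_counts : List Int := List.replicate x.length 0
  let mod_counts :=
    (PySem.List.pyRange 0 n 1).foldl (fun mc i =>
      let k := PySem.Int.mod (-(PySem.List.pyGetD x i 0)) n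
      PySem.List.pySetD mc k (PySem.List.pyGetD mc k 0 + 1)) mod_counts
  let count :=
    (PySem.List.pyRange 0 n 1).foldl (fun c i =>
      c + PySem.List.pyGetD mod_counts
            (PySem.Int.mod (PySem.List.pyGetD x i 0 + PySem.List.pyGetD x (-1) 0) n) 0) count
  PySem.Int.mod count n

-- ===== PORT B =====
def count_triplets_linear_alt (x : List Int) : Int :=
  let n : Int := x.length
  let count : Int := 0
  let count :=
    (PySem.List.pyRange 0 n 1).foldl (fun c i =>
      (PySem.List.pyRange 0 n 1).foldl (fun c j =>
        if PySem.Int.mod (PySem.List.pyGetD x i 0 + PySem.List.pyGetD x j 0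
                          + PySem.List.pyGetD x (-1) 0) n = 0
        then c + 1 else c) c) count
  PySem.Int.mod count n

-- ===== PRECONDITION & SPEC =====
-- A raises ZeroDivisionError on the empty list (0 % 0); so does B.
def Pre_count_triplets_linear (x : List Int) : Prop := x ≠ []
instance (x : List Int) : Decidable (Pre_count_triplets_linear x) := by
  unfold Pre_count_triplets_linear; infer_instance
def pvWitness_count_triplets_linear : List Int := [1, 2, 3]

def Spec_count_triplets_linear (x : List Int) (out : Int) : Prop := out = count_triplets_linear_alt x
instance (x : List Int) (out : Int) : Decidable (Spec_count_triplets_linear x out) := by unfold Spec_count_triplets_linear; infer_instance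

-- ===== CLAIM (what is proved, stated in full; the proofs are below) =====
def Claim_equal_count_triplets_linear : Prop := ∀ (x : List Int), Dom_count_triplets_linear x → Pre_count_triplets_linear x → Spec_count_triplets_linear x (count_triplets_linear x)

-- ===== LEMMAS AND PROOFS =====

-- invariant of A's first loop: bucket k of the resulting table holds its initial
-- value plus the number of elements v of ys with (-v) % n = k
theorem pv_mc_inv (n : Int) (hn : 0 < n) (ys : List Int) (mc : List Int)
    (hlen : (mc.length : Int) = n) (k : Int) (hk0 : 0 ≤ k) (hkn : k < n) :
    PySem.List.pyGetD
      (ys.foldl (fun mc v =>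
        let k := PySem.Int.mod (-v) n
        PySem.List.pySetD mc k (PySem.List.pyGetD mc k 0 + 1)) mc) k 0
      = PySem.List.pyGetD mc k 0 + (ys.countP (fun v => PySem.Int.mod (-v) n = k)) := by
  induction ys generalizing mc with
  | nil => simp
  | cons v ys ih =>
    simp only [List.foldl_cons, List.countP_cons]
    have hm0 : 0 ≤ PySem.Int.mod (-v) n := PySem.Int.mod_nonneg _ hn
    have hmn : PySem.Int.mod (-v) n < n := PySem.Int.mod_lt _ hn
    have hlen' : ((PySem.List.pySetD mc (PySem.Int.mod (-v) n)
        (PySem.List.pyGetD mc (PySem.Int.mod (-v) n) 0 + 1)).length : Int) = n := by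
      rw [PySem.List.pySetD_of_nonneg _ _ hm0]; simpa using hlen
    rw [ih _ hlen']
    rw [PySem.List.pySetD_of_nonneg _ _ hm0]
    by_cases hek : PySem.Int.mod (-v) n = k
    · subst hek
      have hget : PySem.List.pyGetD (mc.set (PySem.Int.mod (-v) n).toNat
          (PySem.List.pyGetD mc (PySem.Int.mod (-v) n) 0 + 1)) (PySem.Int.mod (-v) n) 0
          = PySem.List.pyGetD mc (PySem.Int.mod (-v) n) 0 + 1 := by
        rw [PySem.List.pyGetD_eq_getElem _ _ hm0 (by simp only [List.length_set]; omega),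
            PySem.List.pyGetD_eq_getElem _ _ hm0 (by omega)]
        simp [List.getElem_set_self]
      rw [hget]
      simp
      omega
    · have hget : PySem.List.pyGetD (mc.set (PySem.Int.mod (-v) n).toNat
          (PySem.List.pyGetD mc (PySem.Int.mod (-v) n) 0 + 1)) k 0
          = PySem.List.pyGetD mc k 0 := by
        rw [PySem.List.pyGetD_eq_getElem _ _ hk0 (by simp only [List.length_set]; omega),
            PySem.List.pyGetD_eq_getElem _ _ hk0 (by omega)]
        rw [List.getElem_set_ne (by omega)]
      simp [hget, hek]

-- per-element congruence: the two modular conditions pick out the same j's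
theorem pv_pred_iff (n a b : Int) (hn : 0 < n) :
    (PySem.Int.mod (-b) n = PySem.Int.mod a n) ↔ (PySem.Int.mod (a + b) n = 0) := by
  rw [PySem.Int.mod_eq_emod_of_pos hn, PySem.Int.mod_eq_emod_of_pos hn,
      PySem.Int.mod_eq_emod_of_pos hn,
      Int.emod_eq_emod_iff_emod_sub_eq_zero,
      PySem.Int.emod_eq_zero_iff_dvd, PySem.Int.emod_eq_zero_iff_dvd]
  constructor <;> intro h
  · have e : a + b = -(-b - a) := by ring
    rw [e]; exact dvd_neg.mpr h
  · have e : -b - a = -(a + b) := by ring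
    rw [e]; exact dvd_neg.mpr h

-- ===== VERDICT (by name: the statement is the Claim_ definition above) =====
theorem count_triplets_linear_spec : Claim_equal_count_triplets_linear := by
  intro x _ hx
  unfold Spec_count_triplets_linear count_triplets_linear count_triplets_linear_alt
  simp only []
  have hn : 0 < (x.length : Int) := by
    cases x with
    | nil => exact absurd rfl hx
    | cons a t => simp
  set n : Int := (x.length : Int) with hndef
  set last : Int := PySem.List.pyGetD x (-1) 0 with hlast
  -- rewrite both index loops as folds over x itself
  rw [PySem.List.foldl_pyRange_zero_pyGetD' x 0
        (fun mc v =>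
          let k := PySem.Int.mod (-v) n
          PySem.List.pySetD mc k (PySem.List.pyGetD mc k 0 + 1))
        (List.replicate x.length 0)]
  congr 1
  rw [PySem.List.foldl_pyRange_zero_pyGetD' x 0
        (fun c v =>
          c + PySem.List.pyGetD
            ((x.foldl (fun mc v =>
              let k := PySem.Int.mod (-v) n
              PySem.List.pySetD mc k (PySem.List.pyGetD mc k 0 + 1)) (List.replicate x.length 0)))
            (PySem.Int.mod (v + last) n) 0) 0]
  rw [PySem.List.foldl_pyRange_zero_pyGetD' x 0
        (fun c v =>
          (PySem.List.pyRange 0 n 1).foldl (fun c j =>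
            if PySem.Int.mod (v + PySem.List.pyGetD x j 0 + last) n = 0
            then c + 1 else c) c) 0]
  -- both sides are now folds over x; show the step functions agree on members
  apply PySem.List.foldl_congr_mem
  intro c v _
  -- A's step: bucket lookup = count of matching elements of x
  have hA : PySem.List.pyGetD
      ((x.foldl (fun mc v =>
        let k := PySem.Int.mod (-v) n
        PySem.List.pySetD mc k (PySem.List.pyGetD mc k 0 + 1)) (List.replicate x.length 0)))
      (PySem.Int.mod (v + last) n) 0
      = (x.countP (fun w => PySem.Int.mod (-w) n = PySem.Int.mod (v + last) n) : Int) := by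
    rw [pv_mc_inv n hn x (List.replicate x.length 0) (by simp [hndef])
          (PySem.Int.mod (v + last) n) (PySem.Int.mod_nonneg _ hn) (PySem.Int.mod_lt _ hn)]
    rw [PySem.List.pyGetD_eq_getElem _ _ (PySem.Int.mod_nonneg _ hn)
          (by simpa using PySem.Int.mod_lt (v + last) hn)]
    simp
  -- B's step: the inner loop is the same count with the merged condition
  have hB : (PySem.List.pyRange 0 n 1).foldl (fun c j =>
        if PySem.Int.mod (v + PySem.List.pyGetD x j 0 + last) n = 0
        then c + 1 else c) c
      = c + (x.countP (fun w => PySem.Int.mod (v + w + last) n = 0) : Int) := by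
    rw [PySem.List.foldl_pyRange_zero_pyGetD' x 0
          (fun c w => if PySem.Int.mod (v + w + last) n = 0 then c + 1 else c) c]
    simpa using PySem.List.foldl_count_if
      (fun w => decide (PySem.Int.mod (v + w + last) n = 0)) x c
  rw [hA, hB]
  congr 2
  apply List.countP_congr
  intro w _
  simp only [decide_eq_true_eq]
  constructor
  · intro h
    have := (pv_pred_iff n (v + last) w hn).mp h
    have e : v + last + w = v + w + last := by ring
    rwa [e] at this
  · intro h
    apply (pv_pred_iff n (v + last) w hn).mpr
    have e : v + last + w = v + w + last := by ring
    rwa [e]
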